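-- pv_equiv track=rewrite | github.com/David-Hien/Unit-1 | Practice_Functions.py | black_box3
-- ===== SOURCE A (Python) =====
-- def black_box3(number):
--     count = 0
--     i = number
--     while i > 9:
--         if i % 10 == 0:
--             count += 1
--         i //= 10
--     return count
-- ===== SOURCE B (Python) =====
-- def black_box3(number):
--     if number < 10:
--         return 0
--     return str(number)[1:].count('0')
-- ===== Notes on version B (the rewrite author's own statement) =====
-- stated objective: idiomatic
-- what changed: Replaces the arithmetic mod/floordiv digit-stripping loop by converting the number to its decimal string and counting '0' characters after the leading digit (with an early 0 for number < 10, where A's loop never runs).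
import Mathlib
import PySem

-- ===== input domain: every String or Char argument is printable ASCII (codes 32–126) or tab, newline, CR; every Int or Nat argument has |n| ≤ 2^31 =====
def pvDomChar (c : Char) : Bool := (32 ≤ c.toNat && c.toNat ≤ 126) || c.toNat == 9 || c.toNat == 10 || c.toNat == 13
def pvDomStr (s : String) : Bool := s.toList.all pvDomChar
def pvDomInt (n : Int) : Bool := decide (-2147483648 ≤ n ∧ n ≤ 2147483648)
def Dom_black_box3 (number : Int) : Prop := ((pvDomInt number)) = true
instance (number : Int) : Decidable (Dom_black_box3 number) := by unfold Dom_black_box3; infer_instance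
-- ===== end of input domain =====

-- B counts '0' characters in the decimal string after the leading digit instead of A's mod/floordiv loop; objective: idiomatic.

-- ===== PORT A =====
-- the while loop of A: while i > 9: if i % 10 == 0: count += 1; i //= 10
def black_box3_loop (i : Int) (count : Int) : Int :=
  if 9 < i then
    black_box3_loop (PySem.Int.floordiv i 10)
      (if PySem.Int.mod i 10 = 0 then count + 1 else count)
  else count
termination_by i.toNat
decreasing_by
  rw [PySem.Int.floordiv_eq_ediv_of_pos (by omega)]
  omega

def black_box3 (number : Int) : Int := black_box3_loop number 0

-- ===== PORT B =====
def black_box3_alt (number : Int) : Int :=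
  if number < 10 then 0
  else (PySem.Str.count (PySem.Str.slice (PySem.Int.toStr number) (some 1) none) "0" : Int)

-- ===== PRECONDITION & SPEC =====
def Spec_black_box3 (number : Int) (out : Int) : Prop := out = black_box3_alt number
instance (number : Int) (out : Int) : Decidable (Spec_black_box3 number out) := by unfold Spec_black_box3; infer_instance

-- ===== CLAIM (what is proved, stated in full; the proofs are below) =====
def Claim_equal_black_box3 : Prop := ∀ (number : Int), Dom_black_box3 number → Spec_black_box3 number (black_box3 number)

-- ===== LEMMAS AND PROOFS =====

-- PySem.Chars.count with a single-character pattern is List.count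
lemma count_go_singleton (c : Char) (fuel : Nat) (l : List Char) (acc : Nat)
    (h : l.length ≤ fuel) :
    PySem.Chars.count.go [c] fuel l acc = acc + l.count c := by
  induction fuel generalizing l acc with
  | zero =>
    have : l = [] := by
      cases l with
      | nil => rfl
      | cons x xs => simp at h
    subst this
    simp [PySem.Chars.count.go]
  | succ f ih =>
    cases l with
    | nil => simp [PySem.Chars.count.go]
    | cons x xs =>
      rw [PySem.Chars.count.go]
      by_cases hx : c = x
      · subst hx
        have hp : [c].isPrefixOf (c :: xs) = true := by simp [List.isPrefixOf]
        simp only [hp, if_true, List.length_cons] at *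
        simp only [List.length_nil, Nat.zero_add, List.drop_succ_cons, List.drop_zero]
        rw [ih xs (acc + 1) (by omega)]
        simp
        omega
      · have hp : [c].isPrefixOf (x :: xs) = false := by
          simp [List.isPrefixOf, hx]
        simp only [hp, Bool.false_eq_true, if_false]
        rw [ih xs acc (by simpa using Nat.le_of_succ_le_succ (by simpa using h))]
        simp [Ne.symm hx]

lemma chars_count_singleton (l : List Char) (c : Char) :
    PySem.Chars.count l [c] = l.count c := by
  simp [PySem.Chars.count]
  rw [count_go_singleton c l.length l 0 (le_refl _)]
  omega

-- digitChar of a digit is '0' exactly for the digit 0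
lemma digitChar_eq_zero_iff (d : Nat) (hd : d < 10) : (Nat.digitChar d = '0') ↔ d = 0 := by
  interval_cases d <;> simp [Nat.digitChar]

-- A's loop computes the number of '0' characters after the leading digit of m
lemma loop_eq_count (m : Nat) : ∀ c : Int,
    black_box3_loop (m : Int) c = c + (((Nat.toDigits 10 m).tail.count '0' : Nat) : Int) := by
  induction m using Nat.strong_induction_on with
  | _ m ih =>
    intro c
    by_cases hm : m < 10
    · rw [black_box3_loop]
      have h9 : ¬ (9 < (m : Int)) := by omega
      rw [if_neg h9, Nat.toDigits_of_lt_base hm]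
      simp
    · rw [Nat.not_lt] at hm
      rw [black_box3_loop]
      have h9 : 9 < (m : Int) := by omega
      rw [if_pos h9]
      have hfd : PySem.Int.floordiv (m : Int) 10 = ((m / 10 : Nat) : Int) := by
        exact_mod_cast PySem.Int.floordiv_natCast m 10
      have hmod : PySem.Int.mod (m : Int) 10 = ((m % 10 : Nat) : Int) := by
        exact_mod_cast PySem.Int.mod_natCast m 10
      rw [hfd, hmod, ih (m / 10) (Nat.div_lt_self (by omega) (by omega))]
      have hdig : Nat.toDigits 10 m = Nat.toDigits 10 (m / 10) ++ [(m % 10).digitChar] :=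
        Nat.toDigits_of_base_le (by omega) hm
      have hne : Nat.toDigits 10 (m / 10) ≠ [] := by
        have := @Nat.length_toDigits_pos 10 (m / 10)
        intro h; rw [h] at this; simp at this
      rw [hdig, List.tail_append_of_ne_nil hne, List.count_append]
      by_cases hz : m % 10 = 0
      · have : ((m % 10 : Nat) : Int) = 0 := by exact_mod_cast hz
        rw [if_pos this]
        have : (m % 10).digitChar = '0' := by rw [hz]; rfl
        simp [this]
        ring
      · have : ¬ (((m % 10 : Nat) : Int) = 0) := by exact_mod_cast hz
        rw [if_neg this]
        have hnc : (m % 10).digitChar ≠ '0' := by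
          rw [ne_eq, digitChar_eq_zero_iff _ (Nat.mod_lt _ (by omega))]
          exact hz
        simp [hnc]

-- B computes the same count for number ≥ 10
lemma alt_eq_count (n : Int) (hn : 10 ≤ n) :
    black_box3_alt n = (((Nat.toDigits 10 n.toNat).tail.count '0' : Nat) : Int) := by
  unfold black_box3_alt
  rw [if_neg (by omega)]
  rw [PySem.Str.count_eq]
  have hs : (PySem.Str.slice (PySem.Int.toStr n) (some 1) none).toList
      = (Nat.toDigits 10 n.toNat).tail := by
    unfold PySem.Str.slice PySem.Int.toStr
    rw [String.toList_ofList]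
    simp only [PySem.Chars.slice_eq_listSlice]
    rw [String.toList_ofList, PySem.List.slice_from_one]
    unfold PySem.Int.toChars
    rw [if_neg (by omega)]
  rw [hs]
  have : ("0" : String).toList = ['0'] := rfl
  rw [this, chars_count_singleton]

-- ===== VERDICT (by name: the statement is the Claim_ definition above) =====
theorem black_box3_spec : Claim_equal_black_box3 := by
  intro number _
  unfold Spec_black_box3 black_box3
  by_cases h : number < 10
  · rw [black_box3_loop, if_neg (by omega)]
    unfold black_box3_alt
    rw [if_pos h]
  · rw [Int.not_lt] at h
    have hn : number = (number.toNat : Int) := by omega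
    rw [alt_eq_count number h, hn, loop_eq_count number.toNat 0, zero_add, Int.toNat_natCast]
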